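-- pv_equiv track=rewrite | github.com/awarebayes/Python1Sem | year_1/december/lab10.py | scan_for_expressions
-- ===== SOURCE A (Python) =====
-- def scan_for_expressions(string):
--     expr = [""]
--     for i in string:
--         if i.isdigit() or i in "+-/*%^√()": # math symbol
--             expr[-1] += i
--         elif i == " " and expr[-1] != "": # space
--             expr[-1] += i
--         else: # no need for multiple ""
--             if expr[-1] != "":
--                 expr.append("")
--
--     # filter out junk
--     expr = filter(lambda e: e != " " and e != "", expr)
--     return expr
-- ===== SOURCE B (Python) =====
-- def scan_for_expressions(string):
--     # one pass: keep math chars/digits/spaces, replace every other char by a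
--     # sentinel; split on the sentinel into maximal runs, strip leading spaces.
--     marked = ''.join(
--         c if (c.isdigit() or c in "+-/*%^√()" or c == ' ') else '\n'
--         for c in string)
--     return filter(None, (run.lstrip(' ') for run in marked.split('\n')))
-- ===== Notes on version B (the rewrite author's own statement) =====
-- stated objective: alternative
-- what changed: A grows a list of runs in-place one character at a time with branch logic on the current last element; B marks every non-expression character with a sentinel in one pass, splits the marked string on the sentinel into maximal runs, and left-strips spaces from each run.
import Mathlib
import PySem

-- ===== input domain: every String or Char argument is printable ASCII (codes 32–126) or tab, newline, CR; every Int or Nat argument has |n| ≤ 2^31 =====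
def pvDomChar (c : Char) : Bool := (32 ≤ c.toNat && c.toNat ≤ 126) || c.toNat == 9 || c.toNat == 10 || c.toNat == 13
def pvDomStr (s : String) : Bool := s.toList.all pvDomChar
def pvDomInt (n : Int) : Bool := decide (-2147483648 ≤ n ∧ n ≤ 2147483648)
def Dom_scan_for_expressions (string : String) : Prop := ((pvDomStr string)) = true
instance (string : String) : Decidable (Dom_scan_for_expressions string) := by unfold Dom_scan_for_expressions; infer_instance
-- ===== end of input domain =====

-- B rebuilds the result by marking non-expression chars with a sentinel, splitting on it
-- and left-stripping spaces (objective: simpler one-pass decomposition; no speed claim).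

-- ===== PORT A =====
-- the char test of A's first branch: i.isdigit() or i in "+-/*%^√()" (single-char membership)
def pvMathC (i : Char) : Bool := PySem.Chars.isdigit i || "+-/*%^√()".toList.contains i

-- the body of A's for-loop: operates on the last element of the accumulator list
def pvStepA (expr : List String) (i : Char) : List String :=
  if pvMathC i then
    expr.dropLast ++ [(expr.getLastD "").push i]                   -- expr[-1] += i
  else if i == ' ' && !((expr.getLastD "") == "") then
    expr.dropLast ++ [(expr.getLastD "").push i]                   -- expr[-1] += i
  else if !((expr.getLastD "") == "") then expr ++ [""] else expr

def scan_for_expressions (string : String) : List String :=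
  let expr := string.toList.foldl pvStepA [""]
  -- filter(lambda e: e != " " and e != "", expr)
  expr.filter (fun e => !(e == " ") && !(e == ""))

-- ===== PORT B =====
-- B's keep test: c.isdigit() or c in "+-/*%^√()" or c == ' '
def pvKeepC (c : Char) : Bool := pvMathC c || c == ' '

def scan_for_expressions_alt (string : String) : List String :=
  let marked := string.toList.map (fun c => if pvKeepC c then c else '\n')
  -- run.lstrip(' ') is dropWhile (· == ' '): exact, the stripped-char set is {' '}
  ((PySem.Chars.splitOn marked ['\n']).map
      (fun run => String.ofList (run.dropWhile (· == ' ')))).filter (fun s => !(s == ""))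

-- ===== PRECONDITION & SPEC =====
def Spec_scan_for_expressions (string : String) (out : List String) : Prop := out = scan_for_expressions_alt string
instance (string : String) (out : List String) : Decidable (Spec_scan_for_expressions string out) := by unfold Spec_scan_for_expressions; infer_instance

-- ===== CLAIM (what is proved, stated in full; the proofs are below) =====
def Claim_equal_scan_for_expressions : Prop := ∀ (string : String), Dom_scan_for_expressions string → Spec_scan_for_expressions string (scan_for_expressions string)

-- ===== LEMMAS AND PROOFS =====

-- String.ofList is injective on ==
theorem pvOfeq (l m : List Char) : (String.ofList l == String.ofList m) = (l == m) := by
  by_cases h : l = m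
  · simp [h]
  · have : ¬ String.ofList l = String.ofList m := by
      intro hh; exact h (String.ofList_inj.mp hh)
    simp [h, this]

-- A's loop on the char-list level: only the current (last) run matters
def pvAux : List Char → List Char → List (List Char)
  | cur, [] => [cur]
  | cur, c :: cs =>
    if pvMathC c then pvAux (cur ++ [c]) cs
    else if c == ' ' && !(cur == []) then pvAux (cur ++ [c]) cs
    else if !(cur == []) then cur :: pvAux [] cs
    else pvAux cur cs

-- raw maximal runs of kept characters (the pieces of B's split)
def pvPieces : List Char → List Char → List (List Char)
  | p, [] => [p]
  | p, c :: cs => if pvKeepC c then pvPieces (p ++ [c]) cs else p :: pvPieces [] cs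

-- split-on-'\n' with an accumulator
def pvSplitNl : List Char → List Char → List (List Char)
  | p, [] => [p]
  | p, c :: cs => if c == '\n' then p :: pvSplitNl [] cs else pvSplitNl (p ++ [c]) cs

theorem pvStepA_concat (pre : List String) (cur : List Char) (i : Char) :
    pvStepA (pre ++ [String.ofList cur]) i =
      if pvMathC i then pre ++ [String.ofList (cur ++ [i])]
      else if i == ' ' && !(cur == []) then pre ++ [String.ofList (cur ++ [i])]
      else if !(cur == []) then (pre ++ [String.ofList cur]) ++ [String.ofList []] else pre ++ [String.ofList cur] := by
  have hpush : (String.ofList cur).push i = String.ofList (cur ++ [i]) := by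
    apply String.toList_inj.mp; simp
  have hemp : (String.ofList cur == "") = (cur == []) := by
    rw [show ("" : String) = String.ofList [] from rfl, pvOfeq]
  simp only [pvStepA, List.getLastD_concat, List.dropLast_concat, hpush, hemp,
    show ("" : String) = String.ofList [] from rfl, List.append_assoc, List.singleton_append]

theorem pvFoldA (l : List Char) : ∀ (pre : List String) (cur : List Char),
    l.foldl pvStepA (pre ++ [String.ofList cur]) = pre ++ (pvAux cur l).map String.ofList := by
  induction l with
  | nil => intro pre cur; simp [pvAux]
  | cons c cs ih =>
    intro pre cur
    rw [List.foldl_cons, pvStepA_concat]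
    by_cases hm : pvMathC c = true
    · simp only [pvAux, hm, if_true, ih]
    · simp only [hm, Bool.false_eq_true, if_false]
      by_cases hsp : (c == ' ' && !(cur == [])) = true
      · simp only [pvAux, hm, Bool.false_eq_true, if_false, hsp, if_true, ih]
      · simp only [hsp, Bool.false_eq_true, if_false]
        by_cases hne : (!(cur == [])) = true
        · have hc : (c == ' ') = false := by
            by_cases h : (c == ' ') = true
            · refine absurd ?_ hsp
              simp only [h, Bool.true_and]
              exact hne
            · simpa using h
          simp only [hne, if_true]
          rw [show pre ++ [String.ofList cur] ++ [String.ofList []] =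
                (pre ++ [String.ofList cur]) ++ [String.ofList []] from rfl, ih]
          simp only [pvAux, hm, Bool.false_eq_true, if_false, hc, Bool.false_and, hne, if_true,
            List.map_cons, List.append_assoc, List.singleton_append]
        · have hne' : (!(cur == [])) = false := by simpa using hne
          simp only [hne', Bool.false_eq_true, if_false, pvAux, hm, Bool.and_false, ih]

theorem pvLstrip_ne_space (p : List Char) : p.dropWhile (fun c => c == ' ') ≠ [' '] := by
  induction p with
  | nil => simp
  | cons c cs ih =>
    by_cases h : c = ' '
    · simpa [List.dropWhile, h] using ih
    · have hcb : (c == ' ') = false := by simp [h]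
      simp [List.dropWhile, hcb, h]

theorem pvMathC_ne_space {c : Char} (h : pvMathC c = true) : (c == ' ') = false := by
  by_cases hc : c = ' '
  · subst hc; exact absurd h (by decide)
  · simp [hc]

-- the central correspondence: A's runs, left-stripped, against B's raw pieces
theorem pvMain (cs : List Char) : ∀ (p : List Char),
    ((pvAux (p.dropWhile (fun c => c == ' ')) cs).map String.ofList).filter
        (fun e => !(e == " ") && !(e == "")) =
      ((pvPieces p cs).map (fun r => String.ofList (r.dropWhile (fun c => c == ' ')))).filter
        (fun s => !(s == "")) := by
  have hfa : ∀ (r : List Char), r ≠ [' '] →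
      (!(String.ofList r == " ") && !(String.ofList r == "")) = !(r == []) := by
    intro r hr
    rw [show (" " : String) = String.ofList [' '] from rfl,
        show ("" : String) = String.ofList [] from rfl, pvOfeq, pvOfeq]
    have : (r == [' ']) = false := by simp [hr]
    simp [this]
  have hfb : ∀ (r : List Char),
      (!(String.ofList (r.dropWhile (fun c => c == ' ')) == "")) =
        !(r.dropWhile (fun c => c == ' ') == []) := by
    intro r
    rw [show ("" : String) = String.ofList [] from rfl, pvOfeq]
  induction cs with
  | nil =>
    intro p
    simp only [pvAux, pvPieces, List.map_cons, List.map_nil, List.filter]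
    rw [hfa _ (pvLstrip_ne_space p), hfb p]
  | cons c cs ih =>
    intro p
    have hr : p.dropWhile (fun c => c == ' ') ≠ [' '] := pvLstrip_ne_space p
    by_cases hm : pvMathC c = true
    · have hcs : (c == ' ') = false := pvMathC_ne_space hm
      have hk : pvKeepC c = true := by simp [pvKeepC, hm]
      have hdw : (p ++ [c]).dropWhile (fun x => x == ' ') =
          p.dropWhile (fun x => x == ' ') ++ [c] := by
        rw [List.dropWhile_append]
        by_cases he : (p.dropWhile (fun x => x == ' ')).isEmpty = true
        · simp [List.dropWhile, hcs, List.isEmpty_iff.mp he]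
        · simp [he]
      simp only [pvAux, pvPieces, hm, hk, if_true]
      rw [← hdw, ih]
    · by_cases hsp : c = ' '
      · subst hsp
        have hk : pvKeepC ' ' = true := by decide
        by_cases hne : p.dropWhile (fun x => x == ' ') = []
        · have hdw : (p ++ [' ']).dropWhile (fun x => x == ' ') = [] := by
            rw [List.dropWhile_append]
            simp [hne]
          simp only [pvAux, pvPieces, hm, Bool.false_eq_true, if_false, hk, if_true, hne]
          have := ih (p ++ [' '])
          rw [hdw] at this
          simpa using this
        · have hdw : (p ++ [' ']).dropWhile (fun x => x == ' ') =
              p.dropWhile (fun x => x == ' ') ++ [' '] := by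
            rw [List.dropWhile_append]
            simp [List.isEmpty_iff, hne]
          simp only [pvAux, pvPieces, hm, Bool.false_eq_true, if_false, hk, if_true]
          have hb : (!(p.dropWhile (fun x => x == ' ') == [])) = true := by simp [hne]
          simp only [beq_self_eq_true, Bool.true_and, hb, if_true]
          rw [← hdw, ih]
      · have hk : pvKeepC c = false := by simp [pvKeepC, hm, hsp]
        have hcs : (c == ' ') = false := by simp [hsp]
        by_cases hne : p.dropWhile (fun x => x == ' ') = []
        · simp only [pvAux, pvPieces, hm, Bool.false_eq_true, if_false, hk, hcs,
            Bool.false_and, if_false, hne, beq_self_eq_true, Bool.not_true,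
            List.map_cons, List.filter_cons]
          have := ih []
          simp only [List.dropWhile_nil] at this
          simpa using this
        · have h1 : (!(p.dropWhile (fun x => x == ' ') == [])) = true := by simp [hne]
          have htail := ih []
          simp only [List.dropWhile_nil] at htail
          have h2 : (!(String.ofList (p.dropWhile (fun c => c == ' ')) == " ")) = true := by
            rw [show (" " : String) = String.ofList [' '] from rfl, pvOfeq]
            simp [hr]
          simp only [pvAux, pvPieces, hm, Bool.false_eq_true, if_false, hcs,
            hk, h1, h2, Bool.and_true, if_true,
            List.map_cons, List.filter_cons, hfb p, htail]

theorem pvPieces_splitNl (l : List Char) : ∀ p : List Char,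
    pvPieces p l = pvSplitNl p (l.map (fun c => if pvKeepC c then c else '\n')) := by
  induction l with
  | nil => intro p; rfl
  | cons c cs ih =>
    intro p
    by_cases hk : pvKeepC c = true
    · have hnl : (c == '\n') = false := by
        by_cases h : c = '\n'
        · subst h; exact absurd hk (by decide)
        · simp [h]
      simp [pvPieces, pvSplitNl, hk, hnl, ih]
    · simp [pvPieces, pvSplitNl, hk, ih]

theorem pvGo (fuel : Nat) : ∀ (m p : List Char) (acc : List (List Char)), m.length < fuel →
    PySem.Chars.splitOn.go ['\n'] fuel m p.reverse acc = acc.reverse ++ pvSplitNl p m := by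
  induction fuel with
  | zero => intro m p acc h; omega
  | succ f ih =>
    intro m p acc h
    rcases m with _ | ⟨c, rest⟩
    · rw [PySem.Chars.splitOn.go]
      · simp [pvSplitNl]
      · omega
    · rw [PySem.Chars.splitOn.go]
      have hpre : (['\n'].isPrefixOf (c :: rest)) = ('\n' == c) := by
        simp [List.isPrefixOf]
      by_cases hc : c = '\n'
      · subst hc
        simp only [hpre, beq_self_eq_true, if_true, List.length_cons, List.length_nil,
          List.drop_succ_cons, List.drop_zero]
        have := ih rest [] (p.reverse.reverse :: acc) (by simpa using Nat.lt_of_succ_lt_succ h)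
        simp only [List.reverse_nil] at this
        rw [this]
        simp [pvSplitNl]
      · have hcb : ('\n' == c) = false := by simp [Ne.symm hc]
        have hcb' : (c == '\n') = false := by simp [hc]
        simp only [hpre, hcb, Bool.false_eq_true, if_false]
        have := ih rest (p ++ [c]) acc (by simpa using Nat.lt_of_succ_lt_succ h)
        simp only [List.reverse_append, List.reverse_cons, List.reverse_nil,
          List.nil_append, List.singleton_append] at this
        simp only [pvSplitNl, hcb', Bool.false_eq_true, if_false]
        exact this

theorem pvSplitOn_eq (m : List Char) :
    PySem.Chars.splitOn m ['\n'] = pvSplitNl [] m := by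
  have := pvGo (m.length + 1) m [] [] (by omega)
  simpa [PySem.Chars.splitOn] using this

-- ===== VERDICT (by name: the statement is the Claim_ definition above) =====
theorem scan_for_expressions_spec : Claim_equal_scan_for_expressions := by
  intro s _
  unfold Spec_scan_for_expressions scan_for_expressions scan_for_expressions_alt
  rw [show ([""] : List String) = [] ++ [String.ofList []] from rfl, pvFoldA]
  rw [List.nil_append]
  have h := pvMain s.toList []
  simp only [List.dropWhile_nil] at h
  rw [h, pvPieces_splitNl, ← pvSplitOn_eq]
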